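-- pv_equiv track=rewrite | github.com/leomet07/cc | pclassic_2023_fall/q7/playground.py | how_many_hit_dict
-- ===== SOURCE A (Python) =====
-- def how_many_hit_dict(heights: "list[int]" ):
--     m = 0
--     hit = [0] * len(heights)
--     for i in range(len(heights)):
--         c = heights[i]
--
--         if c > m:
--             hit[i] = 1
--         m = max(m, c)
--
--     return hit
-- ===== SOURCE B (Python) =====
-- def how_many_hit_dict(heights: "list[int]"):
--     # Two-pass: build a prefix-maximum table (seeded with 0), then compare.
--     prefix = [0] * (len(heights) + 1)
--     for i, h in enumerate(heights):
--         prefix[i + 1] = prefix[i] if prefix[i] > h else h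
--     return [1 if h > p else 0 for h, p in zip(heights, prefix)]
-- ===== Notes on version B (the rewrite author's own statement) =====
-- stated objective: alternative
-- what changed: Replaced the single pass with a running-max accumulator by a two-pass decomposition: first build a prefix-maximum table seeded with 0, then a separate comparison pass marks each element greater than its prefix maximum.
import Mathlib
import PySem

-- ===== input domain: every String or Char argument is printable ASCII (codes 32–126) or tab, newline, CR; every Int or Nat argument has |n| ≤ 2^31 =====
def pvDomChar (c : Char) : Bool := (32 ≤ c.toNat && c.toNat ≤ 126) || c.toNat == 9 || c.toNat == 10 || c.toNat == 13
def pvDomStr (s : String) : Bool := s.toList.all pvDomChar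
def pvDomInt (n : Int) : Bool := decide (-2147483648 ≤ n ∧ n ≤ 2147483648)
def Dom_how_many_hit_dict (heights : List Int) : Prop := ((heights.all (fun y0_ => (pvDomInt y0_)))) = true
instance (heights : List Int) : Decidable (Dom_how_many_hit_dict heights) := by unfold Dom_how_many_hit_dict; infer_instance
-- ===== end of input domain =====

-- B rebuilds A's single running-max pass as a prefix-max table plus a separate comparison pass (alternative decomposition, same cost).

-- ===== PORT A =====
-- A's loop over the elements, carrying the running max m and emitting each hit bit in place.
def pvGoA (m : Int) : List Int → List Int
  | [] => []
  | c :: t => (if c > m then (1 : Int) else 0) :: pvGoA (max m c) t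

def how_many_hit_dict (heights : List Int) : List Int := pvGoA 0 heights

-- ===== PORT B =====
-- Source B's first pass: the prefix-maximum table seeded with m (= 0), prefix[i] = max of seed and first i elements.
def pvPrefixMax (m : Int) : List Int → List Int
  | [] => [m]
  | h :: t => m :: pvPrefixMax (if m > h then m else h) t

def how_many_hit_dict_alt (heights : List Int) : List Int :=
  List.zipWith (fun h p => if h > p then (1 : Int) else 0) heights (pvPrefixMax 0 heights)

-- ===== PRECONDITION & SPEC =====
def Spec_how_many_hit_dict (heights : List Int) (out : List Int) : Prop := out = how_many_hit_dict_alt heights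
instance (heights : List Int) (out : List Int) : Decidable (Spec_how_many_hit_dict heights out) := by unfold Spec_how_many_hit_dict; infer_instance

-- ===== CLAIM (what is proved, stated in full; the proofs are below) =====
def Claim_equal_how_many_hit_dict : Prop := ∀ (heights : List Int), Dom_how_many_hit_dict heights → Spec_how_many_hit_dict heights (how_many_hit_dict heights)

-- ===== LEMMAS AND PROOFS =====
theorem pvGoA_eq_zip (hs : List Int) : ∀ m : Int,
    pvGoA m hs = List.zipWith (fun h p => if h > p then (1 : Int) else 0) hs (pvPrefixMax m hs) := by
  induction hs with
  | nil => intro m; simp [pvGoA, pvPrefixMax]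
  | cons c t ih =>
    intro m
    simp only [pvGoA, pvPrefixMax, List.zipWith]
    refine congrArg _ ?_
    have hm : max m c = if m > c then m else c := by
      simp [max_def]; omega
    rw [ih (max m c), hm]

-- ===== VERDICT (by name: the statement is the Claim_ definition above) =====
theorem how_many_hit_dict_spec : Claim_equal_how_many_hit_dict := by
  intro heights _
  unfold Spec_how_many_hit_dict how_many_hit_dict how_many_hit_dict_alt
  exact pvGoA_eq_zip heights 0
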